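-- pv_equiv track=rewrite | github.com/eliginsburging/VerbScraper2.0 | wordspider/spiders/stressspider.py | color_stress
-- ===== SOURCE A (Python) =====
-- def color_stress(stressed_line):
--     """
--     takes a string containing a scraped html element with the correct stress
--     for the target word (marked with a bold html tag)
--     (e.g. '<div class="rule ">\n\t\n\t\t В таком варианте ударение следует
--     ставить на слог с буквой О — г<b>О</b>ры. \n\t\t\t</div>')
--     returns a string containing just the target word with the bold tag replaced
--     by a color tag and the stressed vowel in lower case.
--     """
--     stressed_line = stressed_line.replace('<div class="rule ">', '')
--     stressed_line = stressed_line.replace('</div>', '')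
--     stressed_line = stressed_line.replace('\n', '')
--     stressed_line = stressed_line.replace('\t', '')
--     stressed_line = stressed_line.replace('.', '')
--     stressed_line = stressed_line.lower()
--     for word in stressed_line.split():
--         if '<b>' in word:
--             target = word.replace('<b>', "<font color='#0000ff'>")
--             target = target.replace('</b>', '</font>')
--             return target
-- ===== SOURCE B (Python) =====
-- def color_stress(stressed_line):
--     s = stressed_line.replace('<div class="rule ">', '')
--     s = s.replace('</div>', '')
--     s = s.replace('\n', '')
--     s = s.replace('\t', '')
--     s = s.replace('.', '')
--     s = s.lower()
--     rest = s
--     while rest: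
--         if rest[0].isspace():
--             rest = rest[1:]
--             continue
--         k = 0
--         while k < len(rest) and not rest[k].isspace():
--             k += 1
--         word, rest = rest[:k], rest[k:]
--         if '<b>' in word:
--             word = word.replace('<b>', "<font color='#0000ff'>")
--             return word.replace('</b>', '</font>')
--     return None
-- ===== Notes on version B (the rewrite author's own statement) =====
-- stated objective: alternative
-- what changed: B keeps the cleaning chain but replaces split()-into-a-token-list plus a scan over that list with a single fused positional scan that peels whitespace-delimited tokens off the cleaned string in place and stops at the first token containing the bold tag.
import Mathlib
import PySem

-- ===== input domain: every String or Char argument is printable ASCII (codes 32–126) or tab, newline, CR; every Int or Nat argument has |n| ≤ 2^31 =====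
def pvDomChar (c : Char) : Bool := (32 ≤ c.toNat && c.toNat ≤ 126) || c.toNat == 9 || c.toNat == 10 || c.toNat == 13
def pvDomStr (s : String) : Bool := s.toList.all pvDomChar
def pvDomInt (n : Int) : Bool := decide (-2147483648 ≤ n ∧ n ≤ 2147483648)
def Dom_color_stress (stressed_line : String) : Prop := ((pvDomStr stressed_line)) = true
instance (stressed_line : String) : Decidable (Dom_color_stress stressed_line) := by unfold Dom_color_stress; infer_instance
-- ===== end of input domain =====

-- B replaces split()-into-a-list plus a scan over the list with one fused positional scan
-- that peels tokens off the cleaned string in place (objective: alternative decomposition).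

-- shared by both Pythons verbatim: the five replaces + lower, and the two tag replaces
def pvClean (s : String) : String :=
  PySem.Str.lower
    (PySem.Str.replace
      (PySem.Str.replace
        (PySem.Str.replace
          (PySem.Str.replace
            (PySem.Str.replace s "<div class=\"rule \">" "")
            "</div>" "")
          "\n" "")
        "\t" "")
      "." "")

def pvColor (w : String) : String :=
  PySem.Str.replace (PySem.Str.replace w "<b>" "<font color='#0000ff'>") "</b>" "</font>"

-- ===== PORT A =====
-- the 'for word in stressed_line.split(): …' loop, first match wins
def colorLoopA : List String → Option String
  | [] => none
  | w :: ws => if PySem.Str.isIn "<b>" w then some (pvColor w) else colorLoopA ws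

def color_stress (stressed_line : String) : Option String :=
  colorLoopA (PySem.Str.split₀ (pvClean stressed_line))

-- ===== PORT B =====
-- fused scan: skip a whitespace char, or peel the leading token (rest[:k]/rest[k:]) and test it
def scanB : List Char → Option String
  | [] => none
  | c :: rest =>
    if PySem.Chars.isspace c then scanB rest
    else
      let tok := (c :: rest).takeWhile (fun d => !PySem.Chars.isspace d)
      let rest' := (c :: rest).dropWhile (fun d => !PySem.Chars.isspace d)
      if PySem.Chars.isIn ['<', 'b', '>'] tok then some (pvColor (String.ofList tok))
      else scanB rest'
termination_by cs => cs.length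
decreasing_by
  · simp
  · simp only [List.dropWhile]
    simp_all
    exact List.length_dropWhile_le _ rest

def color_stress_alt (stressed_line : String) : Option String :=
  scanB (pvClean stressed_line).toList

-- ===== PRECONDITION & SPEC =====
def Spec_color_stress (stressed_line : String) (out : Option String) : Prop := out = color_stress_alt stressed_line
instance (stressed_line : String) (out : Option String) : Decidable (Spec_color_stress stressed_line out) := by unfold Spec_color_stress; infer_instance

-- ===== CLAIM (what is proved, stated in full; the proofs are below) =====
def Claim_equal_color_stress : Prop := ∀ (stressed_line : String), Dom_color_stress stressed_line → Spec_color_stress stressed_line (color_stress stressed_line)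

-- ===== LEMMAS AND PROOFS =====

-- reference splitter with the same recursion shape as scanB
def mySplit : List Char → List (List Char)
  | [] => []
  | c :: rest =>
    if PySem.Chars.isspace c then mySplit rest
    else (c :: rest).takeWhile (fun d => !PySem.Chars.isspace d)
      :: mySplit ((c :: rest).dropWhile (fun d => !PySem.Chars.isspace d))
termination_by cs => cs.length
decreasing_by
  · simp
  · simp only [List.dropWhile]
    simp_all
    exact List.length_dropWhile_le _ rest

theorem go_append (s : List Char) : ∀ (cur : List Char) (acc : List (List Char)),
    PySem.Chars.split₀.go s cur acc = acc.reverse ++ PySem.Chars.split₀.go s cur [] := by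
  induction s with
  | nil =>
    intro cur acc
    by_cases h : cur.isEmpty <;> simp [PySem.Chars.split₀.go, h]
  | cons c rest ih =>
    intro cur acc
    by_cases hs : PySem.Chars.isspace c
    · by_cases h : cur.isEmpty
      · simp only [PySem.Chars.split₀.go, hs, h, if_true]
        exact ih [] acc
      · simp only [PySem.Chars.split₀.go, hs, h, if_true, if_false, Bool.false_eq_true]
        rw [ih [] (cur.reverse :: acc), ih [] [cur.reverse]]
        simp
    · simp only [PySem.Chars.split₀.go, hs, Bool.false_eq_true, if_false]
      rw [ih (c :: cur) acc]

theorem go_eq (s : List Char) : ∀ (cur : List Char),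
    PySem.Chars.split₀.go s cur [] =
      if cur.isEmpty then mySplit s
      else (cur.reverse ++ s.takeWhile (fun d => !PySem.Chars.isspace d))
        :: mySplit (s.dropWhile (fun d => !PySem.Chars.isspace d)) := by
  induction s with
  | nil =>
    intro cur
    by_cases h : cur.isEmpty
    · simp_all [PySem.Chars.split₀.go, mySplit]
    · simp [PySem.Chars.split₀.go, h, mySplit]
  | cons c rest ih =>
    intro cur
    by_cases hs : PySem.Chars.isspace c
    · by_cases h : cur.isEmpty
      · simp only [PySem.Chars.split₀.go, hs, h, if_true]
        rw [ih []]
        simp [mySplit, hs]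
      · simp only [PySem.Chars.split₀.go, hs, h, if_true, if_false, Bool.false_eq_true]
        rw [go_append, ih []]
        simp [mySplit, hs, List.takeWhile, List.dropWhile]
    · simp only [PySem.Chars.split₀.go, hs, Bool.false_eq_true, if_false]
      rw [ih (c :: cur)]
      by_cases h : cur.isEmpty
      · have hc : cur = [] := List.isEmpty_iff.mp h
        simp [hc, mySplit, hs, List.takeWhile, List.dropWhile]
      · simp [h, List.takeWhile, List.dropWhile, hs]

theorem split₀_eq_mySplit (s : List Char) : PySem.Chars.split₀ s = mySplit s := by
  have := go_eq s []
  simpa [PySem.Chars.split₀] using this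

theorem str_isIn_bb (l : List Char) :
    PySem.Str.isIn "<b>" (String.ofList l) = PySem.Chars.isIn ['<', 'b', '>'] l := by
  rw [PySem.Str.isIn_eq, show "<b>".toList = ['<', 'b', '>'] from by decide,
    String.toList_ofList]

theorem loopA_mySplit (cs : List Char) :
    colorLoopA ((mySplit cs).map String.ofList) = scanB cs := by
  induction cs using scanB.induct with
  | case1 => simp [mySplit, colorLoopA, scanB]
  | case2 c rest hs ih =>
    rw [mySplit, scanB]
    simp only [hs, if_true]
    exact ih
  | case3 c rest hs tok hb =>
    simp only [tok] at hb
    rw [mySplit, scanB]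
    simp only [hs, Bool.false_eq_true, if_false, List.map_cons, colorLoopA]
    rw [str_isIn_bb, if_pos hb, if_pos hb]
  | case4 c rest hs tok rest' hb ih =>
    simp only [tok] at hb
    simp only [rest'] at ih
    rw [mySplit, scanB]
    simp only [hs, Bool.false_eq_true, if_false, List.map_cons, colorLoopA]
    rw [str_isIn_bb, if_neg hb, if_neg hb]
    exact ih

-- ===== VERDICT (by name: the statement is the Claim_ definition above) =====
theorem color_stress_spec : Claim_equal_color_stress := by
  intro s _
  show color_stress s = color_stress_alt s
  unfold color_stress color_stress_alt
  rw [PySem.Str.split₀, split₀_eq_mySplit, loopA_mySplit]
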